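-- pv_equiv track=rewrite | github.com/Facundo-Barriola/Parser_Lexer | automatas.py | afd_punto_y_coma
-- ===== SOURCE A (Python) =====
-- Estado_Final="Estado Final"
--
-- Estado_No_Final="Estado no final"
--
-- Estado_Trampa="Estado Trampa"
--
-- def afd_punto_y_coma(cadena):
--     estado_actual=0
--     estados_finales=[1]
--     for c in cadena:
--         if (c==";" and estado_actual==0):
--             estado_actual=1
--         else:
--             estado_actual=-1
--             break
--     if estado_actual == -1:
--         return (Estado_Trampa)
--     elif estado_actual in estados_finales:
--         return (Estado_Final)
--     else:
--         return (Estado_No_Final)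
-- ===== SOURCE B (Python) =====
-- Estado_Final="Estado Final"
-- Estado_No_Final="Estado no final"
-- Estado_Trampa="Estado Trampa"
--
-- def afd_punto_y_coma(cadena):
--     n = len(cadena)
--     if n == 0:
--         return Estado_No_Final
--     if n == 1 and cadena[0] == ";":
--         return Estado_Final
--     return Estado_Trampa
-- ===== Notes on version B (the rewrite author's own statement) =====
-- stated objective: simpler
-- what changed: Replaces the DFA state loop with a direct closed-form classification by length and first character (no state variable, no loop).
import Mathlib
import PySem

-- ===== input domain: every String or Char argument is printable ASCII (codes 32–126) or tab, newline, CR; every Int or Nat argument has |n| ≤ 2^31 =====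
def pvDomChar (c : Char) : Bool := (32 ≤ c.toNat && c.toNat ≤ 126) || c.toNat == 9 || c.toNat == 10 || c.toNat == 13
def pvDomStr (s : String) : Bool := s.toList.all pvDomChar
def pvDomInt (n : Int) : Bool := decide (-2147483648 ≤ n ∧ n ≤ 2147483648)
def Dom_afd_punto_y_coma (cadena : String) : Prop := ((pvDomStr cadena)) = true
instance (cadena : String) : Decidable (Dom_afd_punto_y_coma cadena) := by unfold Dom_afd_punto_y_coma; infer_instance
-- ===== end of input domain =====

-- B replaces A's DFA loop with a closed-form classification by length and first character (simpler).

-- ===== PORT A =====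
-- the for-loop with break: returns the final estado_actual
def afdLoopA : List Char → Int → Int
  | [], s => s
  | c :: cs, s => if c = ';' ∧ s = 0 then afdLoopA cs 1 else -1

def afd_punto_y_coma (cadena : String) : String :=
  let estado := afdLoopA cadena.toList 0
  if estado = -1 then "Estado Trampa"
  else if estado = 1 then "Estado Final"
  else "Estado no final"

-- ===== PORT B =====
def afd_punto_y_coma_alt (cadena : String) : String :=
  let n := cadena.toList.length
  if n = 0 then "Estado no final"
  else if n = 1 ∧ cadena.toList.headD ' ' = ';' then "Estado Final"
  else "Estado Trampa"

-- ===== PRECONDITION & SPEC =====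
def Spec_afd_punto_y_coma (cadena : String) (out : String) : Prop := out = afd_punto_y_coma_alt cadena
instance (cadena : String) (out : String) : Decidable (Spec_afd_punto_y_coma cadena out) := by unfold Spec_afd_punto_y_coma; infer_instance

-- ===== CLAIM (what is proved, stated in full; the proofs are below) =====
def Claim_equal_afd_punto_y_coma : Prop := ∀ (cadena : String), Dom_afd_punto_y_coma cadena → Spec_afd_punto_y_coma cadena (afd_punto_y_coma cadena)

-- ===== LEMMAS AND PROOFS =====
theorem afdLoop_tail (cs : List Char) : afdLoopA cs 1 = if cs = [] then 1 else -1 := by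
  cases cs with
  | nil => rfl
  | cons c cs => simp [afdLoopA]

-- ===== VERDICT (by name: the statement is the Claim_ definition above) =====
theorem afd_punto_y_coma_spec : Claim_equal_afd_punto_y_coma := by
  intro cadena _
  unfold Spec_afd_punto_y_coma afd_punto_y_coma afd_punto_y_coma_alt
  cases h : cadena.toList with
  | nil => simp [afdLoopA]
  | cons c cs =>
    by_cases hc : c = ';'
    · simp [afdLoopA, hc, afdLoop_tail]
      cases cs <;> simp
    · simp [afdLoopA, hc]
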